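-- pv_equiv track=rewrite | github.com/shabpi/Advent-of-code-2024-Python | day4.py | diagonalize
-- ===== SOURCE A (Python) =====
-- def diagonalize(text):
--     rows = len(text)
--     columns = len(text[0])
--     output = [[] for k in range(rows + columns - 1)]
--     for j in range(0,columns):
--         for i in range(0,rows):
--             output[i+j].append(text[i][j])
--     return output
-- ===== SOURCE B (Python) =====
-- def diagonalize(text):
--     rows = len(text)
--     columns = len(text[0])
--     return [[text[d - j][j] for j in range(max(0, d - rows + 1), min(d, columns - 1) + 1)]
--             for d in range(rows + columns - 1)]
-- ===== Notes on version B (the rewrite author's own statement) =====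
-- stated objective: simpler
-- what changed: Replaces the scatter (pre-allocate rows+columns-1 buckets, loop over every cell and append it into bucket i+j) by its gather dual: one comprehension that, for each diagonal index d, collects its cells text[d-j][j] directly with j ascending, which matches A's column-major append order.
import Mathlib
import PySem

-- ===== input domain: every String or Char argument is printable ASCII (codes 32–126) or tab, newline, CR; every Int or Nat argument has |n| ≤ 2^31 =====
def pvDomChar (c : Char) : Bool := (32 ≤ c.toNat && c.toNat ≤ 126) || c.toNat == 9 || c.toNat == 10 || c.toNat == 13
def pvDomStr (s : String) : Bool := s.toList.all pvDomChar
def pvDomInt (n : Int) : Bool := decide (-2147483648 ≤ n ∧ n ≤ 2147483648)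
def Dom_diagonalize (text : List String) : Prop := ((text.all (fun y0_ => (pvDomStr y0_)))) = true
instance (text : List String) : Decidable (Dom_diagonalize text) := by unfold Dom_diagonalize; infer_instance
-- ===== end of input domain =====

-- B rewrites A's scatter (append each cell into bucket i+j) as its gather dual
-- (for each diagonal d, collect its cells with j ascending); objective: simpler.

-- shared indexing helper: Python's text[i][j], a one-character string (exact on in-range
-- indices; out-of-range indices, where Python raises IndexError, are excluded by Pre_)
def cellAt (text : List String) (i j : Int) : String :=
  String.ofList [PySem.List.pyGetD (PySem.List.pyGetD text i "").toList j ' ']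

-- ===== PORT A =====
def diagonalize (text : List String) : List (List String) :=
  let rows : Int := text.length
  let columns : Int := PySem.Str.len (PySem.List.pyGetD text 0 "")
  let output : List (List String) := (PySem.List.pyRange 0 (rows + columns - 1) 1).map (fun _ => [])
  (PySem.List.pyRange 0 columns 1).foldl (fun output j =>
    (PySem.List.pyRange 0 rows 1).foldl (fun output i =>
      PySem.List.pySetD output (i + j)
        (PySem.List.pyGetD output (i + j) [] ++ [cellAt text i j])) output) output

-- ===== PORT B =====
def diagonalize_alt (text : List String) : List (List String) :=
  let rows : Int := text.length
  let columns : Int := PySem.Str.len (PySem.List.pyGetD text 0 "")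
  (PySem.List.pyRange 0 (rows + columns - 1) 1).map (fun d =>
    (PySem.List.pyRange (max 0 (d - rows + 1)) (min d (columns - 1) + 1) 1).map
      (fun j => cellAt text (d - j) j))

-- ===== PRECONDITION & SPEC =====
-- Pre_ excludes exactly the inputs where Python A raises IndexError: the empty list
-- (text[0]) and grids whose first row is longer than some later row (text[i][j]).
def Pre_diagonalize (text : List String) : Prop :=
  text ≠ [] ∧ ∀ s ∈ text,
    (PySem.List.pyGetD text 0 "").toList.length ≤ s.toList.length
instance (text : List String) : Decidable (Pre_diagonalize text) := by
  unfold Pre_diagonalize; infer_instance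

def pvWitness_diagonalize : List String := ["abc", "def"]

def Spec_diagonalize (text : List String) (out : List (List String)) : Prop := out = diagonalize_alt text
instance (text : List String) (out : List (List String)) : Decidable (Spec_diagonalize text out) := by unfold Spec_diagonalize; infer_instance

-- ===== CLAIM (what is proved, stated in full; the proofs are below) =====
def Claim_equal_diagonalize : Prop := ∀ (text : List String), Dom_diagonalize text → Pre_diagonalize text → Spec_diagonalize text (diagonalize text)

-- ===== LEMMAS AND PROOFS =====

-- A's inner loop body (one appended cell) and the two loops, over Nat indices
def innerStep (g : Nat → Nat → String) (j : Nat) (o : List (List String)) (i : Nat) :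
    List (List String) :=
  o.set (i + j) (o.getD (i + j) [] ++ [g i j])

def innerFold (g : Nat → Nat → String) (n j : Nat) (out : List (List String)) :
    List (List String) :=
  (List.range n).foldl (innerStep g j) out

def outerFold (g : Nat → Nat → String) (n m : Nat) (out : List (List String)) :
    List (List String) :=
  (List.range m).foldl (fun o j => innerFold g n j o) out

lemma innerFold_succ (g : Nat → Nat → String) (n j : Nat) (out : List (List String)) :
    innerFold g (n + 1) j out = innerStep g j (innerFold g n j out) n := by
  unfold innerFold
  rw [List.range_succ, List.foldl_append, List.foldl_cons, List.foldl_nil]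

lemma outerFold_succ (g : Nat → Nat → String) (n m : Nat) (out : List (List String)) :
    outerFold g n (m + 1) out = innerFold g n m (outerFold g n m out) := by
  unfold outerFold
  rw [List.range_succ, List.foldl_append, List.foldl_cons, List.foldl_nil]

lemma length_innerFold (g : Nat → Nat → String) (n j : Nat) (out : List (List String)) :
    (innerFold g n j out).length = out.length := by
  induction n generalizing out with
  | zero => rfl
  | succ n ih => rw [innerFold_succ, innerStep, List.length_set, ih]

lemma length_outerFold (g : Nat → Nat → String) (n m : Nat) (out : List (List String)) :
    (outerFold g n m out).length = out.length := by
  induction m generalizing out with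
  | zero => rfl
  | succ m ih => rw [outerFold_succ, length_innerFold, ih]

lemma getD_set_eq (o : List (List String)) (i d : Nat) (v : List String) (hi : i < o.length) :
    (o.set i v).getD d [] = if i = d then v else o.getD d [] := by
  simp only [List.getD, List.getElem?_set, hi, if_true]
  split_ifs with h <;> simp

-- effect of the inner pass (column j) on bucket d
lemma getD_innerFold (g : Nat → Nat → String) (n j : Nat) (out : List (List String))
    (hL : n + j ≤ out.length) (d : Nat) :
    (innerFold g n j out).getD d [] =
      out.getD d [] ++ (if j ≤ d ∧ d < j + n then [g (d - j) j] else []) := by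
  induction n generalizing out with
  | zero =>
      have h0 : ¬ (j ≤ d ∧ d < j + 0) := by omega
      simp only [innerFold, List.range_zero, List.foldl_nil, if_neg h0, List.append_nil]
  | succ n ih =>
      rw [innerFold_succ, innerStep,
        getD_set_eq _ _ _ _ (by rw [length_innerFold]; omega)]
      by_cases hd : n + j = d
      · subst hd
        rw [if_pos rfl, ih out (by omega)]
        rw [if_neg (by omega : ¬ ((j ≤ n + j ∧ n + j < j + n))),
          if_pos (by omega : j ≤ n + j ∧ n + j < j + (n + 1)),
          List.append_nil, show n + j - j = n from by omega]
      · rw [if_neg hd, ih out (by omega)]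
        by_cases hc : j ≤ d ∧ d < j + n
        · rw [if_pos hc, if_pos (by omega : j ≤ d ∧ d < j + (n + 1))]
        · rw [if_neg hc, if_neg (by omega : ¬ (j ≤ d ∧ d < j + (n + 1)))]

-- effect of the whole scatter loop on bucket d
lemma getD_outerFold (g : Nat → Nat → String) (n m : Nat) (out : List (List String))
    (hL : n + m ≤ out.length + 1) (d : Nat) :
    (outerFold g n m out).getD d [] =
      out.getD d [] ++
        ((List.range m).filter (fun j => decide (j ≤ d ∧ d < j + n))).map
          (fun j => g (d - j) j) := by
  induction m generalizing out with
  | zero => simp [outerFold]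
  | succ m ih =>
      rw [outerFold_succ,
        getD_innerFold g n m _ (by rw [length_outerFold]; omega) d,
        ih out (by omega), List.range_succ, List.filter_append, List.map_append,
        List.append_assoc]
      congr 1
      by_cases h : m ≤ d ∧ d < m + n
      · simp [h]
      · simp [h]

-- an interval filter of a range is a shifted range
lemma filter_range_Ico (m lo hi : Nat) :
    (List.range m).filter (fun j => decide (lo ≤ j ∧ j < hi)) =
      (List.range (min hi m - lo)).map (fun k => lo + k) := by
  induction m with
  | zero => simp
  | succ m ih =>
      rw [List.range_succ, List.filter_append, ih]
      by_cases h : lo ≤ m ∧ m < hi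
      · rw [show min hi (m + 1) - lo = (min hi m - lo) + 1 from by omega,
          List.range_succ, List.map_append]
        simp [h]
        omega
      · rw [show min hi (m + 1) - lo = min hi m - lo from by omega]
        simp [h]

-- B's gather range for diagonal d holds exactly the j's A's scatter sends to bucket d
lemma gather_eq_filter (text : List String) (n m d : Nat) (hn : 1 ≤ n) (hd : d < n + m - 1) :
    (PySem.List.pyRange (max 0 ((d : Int) - (n : Int) + 1)) (min (d : Int) ((m : Int) - 1) + 1) 1).map
        (fun j => cellAt text ((d : Int) - j) j) =
      ((List.range m).filter (fun j => decide (j ≤ d ∧ d < j + n))).map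
        (fun j => cellAt text ((d - j : Nat) : Int) ((j : Nat) : Int)) := by
  have hlo : max 0 ((d : Int) - (n : Int) + 1) = ((d + 1 - n : Nat) : Int) := by omega
  have hhi : min (d : Int) ((m : Int) - 1) + 1 = ((min (d + 1) m : Nat) : Int) := by
    push_cast; omega
  have hle : d + 1 - n ≤ min (d + 1) m := by omega
  have hkey : (((min (d + 1) m : Nat) : Int) - ((d + 1 - n : Nat) : Int)).toNat
      = min (d + 1) m - (d + 1 - n) := by
    rw [← Nat.cast_sub hle, Int.toNat_natCast]
  have hfc : ∀ x ∈ List.range m,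
      (decide (x ≤ d ∧ d < x + n)) = (decide (d + 1 - n ≤ x ∧ x < d + 1)) := by
    intro x hx
    simp only [decide_eq_decide]
    omega
  rw [hlo, hhi, PySem.List.pyRange_one, hkey, List.filter_congr hfc,
    filter_range_Ico m (d + 1 - n) (d + 1)]
  rw [List.map_map, List.map_map]
  apply List.map_congr_left
  intro k hk
  rw [List.mem_range] at hk
  simp only [Function.comp]
  congr 1 <;> omega

-- the two ports, reduced to Nat-indexed form, coincide bucket by bucket
lemma main_eq (text : List String) (hne : text ≠ []) :
    diagonalize text = diagonalize_alt text := by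
  set n := text.length with hn
  set m := (PySem.List.pyGetD text 0 "").toList.length with hm
  have hn1 : 1 ≤ n := by
    cases text with
    | nil => exact absurd rfl hne
    | cons a l => simp [hn]
  have hA : diagonalize text =
      outerFold (fun i j => cellAt text (i : Int) (j : Int)) n m
        (List.replicate (n + m - 1) []) := by
    unfold diagonalize outerFold innerFold innerStep
    simp only [PySem.Str.len_eq, ← hn, ← hm, PySem.List.pyRange_zero_nat,
      List.foldl_map, ← Nat.cast_add,
      PySem.List.pySetD_natCast, PySem.List.pyGetD_natCast]
    congr 1
    rw [show ((n + m : Nat) : Int) - 1 = ((n + m - 1 : Nat) : Int) from by omega,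
      PySem.List.pyRange_zero_nat, List.map_map]
    simp only [Function.comp_def, List.map_const', List.length_range]
  have hB : diagonalize_alt text =
      (List.range (n + m - 1)).map (fun (d : Nat) =>
        (PySem.List.pyRange (max 0 ((d : Int) - (n : Int) + 1))
            (min (d : Int) ((m : Int) - 1) + 1) 1).map
          (fun j => cellAt text ((d : Int) - j) j)) := by
    unfold diagonalize_alt
    simp only [PySem.Str.len_eq, ← hn, ← hm]
    rw [show (n : Int) + (m : Int) - 1 = ((n + m - 1 : Nat) : Int) from by omega,
      PySem.List.pyRange_zero_nat, List.map_map]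
    rfl
  rw [hA, hB]
  apply List.ext_getElem
  · rw [length_outerFold, List.length_replicate, List.length_map, List.length_range]
  · intro d hd1 hd2
    have hd1' : d < n + m - 1 := by
      rw [length_outerFold, List.length_replicate] at hd1
      exact hd1
    rw [← List.getD_eq_getElem _ [] hd1,
      getD_outerFold _ n m _ (by rw [List.length_replicate]; omega) d,
      List.getD_replicate _ hd1', List.nil_append,
      List.getElem_map, List.getElem_range,
      gather_eq_filter text n m d hn1 hd1']

-- ===== VERDICT (by name: the statement is the Claim_ definition above) =====
theorem diagonalize_spec : Claim_equal_diagonalize := by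
  intro text _ hpre
  exact main_eq text hpre.1
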